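-- pv_equiv track=rewrite | github.com/GutoL/RII-trabalho | Tarefa2/compare_output.py | compare_outputs_per_field
-- ===== SOURCE A (Python) =====
-- from itertools import chain
--
-- def compare_outputs_per_field(car_list_wrapper, car_list_output):
--     expected_fields = {'Cor': 0, 'Ar condicionado': 0, 'Ano': 0, 'Combustivel': 0, 'Marca': 0, 'Km': 0, 'Opcionais': 0,
--                      'Cambio': 0, 'Modelo': 0, 'Tipo de direcao': 0, 'Motor': 0, 'Preco': 0}
--
--     filled_fields={'Cor': 0, 'Ar condicionado': 0, 'Ano': 0, 'Combustivel': 0, 'Marca': 0, 'Km': 0, 'Opcionais': 0, 'Cambio':0, 'Modelo': 0, 'Tipo de direcao': 0, 'Motor': 0, 'Preco': 0}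
--     cover_fields = {'Cor': 0, 'Ar condicionado': 0, 'Ano': 0, 'Combustivel': 0, 'Marca': 0, 'Km': 0, 'Opcionais': 0,
--                      'Cambio': 0, 'Modelo': 0, 'Tipo de direcao': 0, 'Motor': 0, 'Preco': 0}
--     precise_fields = {'Cor': 0, 'Ar condicionado': 0, 'Ano': 0, 'Combustivel': 0, 'Marca': 0, 'Km': 0, 'Opcionais': 0,
--                      'Cambio': 0, 'Modelo': 0, 'Tipo de direcao': 0, 'Motor': 0, 'Preco': 0}
--
--     for i in range(0, len(car_list_wrapper)):
--         for comp in car_list_output[i].keys():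
--             if (car_list_wrapper[i][comp] != "N/I"):
--                 # print car_list_wrapper[i][comp]
--                 filled_fields[comp]+=1
--
--             if (car_list_output[i][comp] != "N/I"):
--                 expected_fields[comp]+=1
--                 # incrementa o contador se o campo no wrapper deveria ter sido preenchido
--                 # por isso fica dentro deste if
--                 if (car_list_wrapper[i][comp] != "N/I"):
--                     cover_fields[comp]+=1
--
--
--                 wrapper_value = list(chain.from_iterable(
--                     map(lambda a: a.split(" "), map(lambda a: a.strip(), car_list_wrapper[i][comp].split(",")))))
--                 expected_value = list(chain.from_iterable(
--                     map(lambda a: a.split(" "), map(lambda a: a.strip(), car_list_output[i][comp].split(",")))))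
--                 # se os campos forem iguais, o contador de precisao aumenta
--                 # strip() é para remover espaços posteriores, ex: comparar 'preto' e 'preto '
--                 if set(wrapper_value) == set(expected_value):
--                     precise_fields[comp]+=1
--     return expected_fields,filled_fields,precise_fields,cover_fields
-- ===== SOURCE B (Python) =====
-- _FIELDS = ['Cor', 'Ar condicionado', 'Ano', 'Combustivel', 'Marca', 'Km', 'Opcionais',
--            'Cambio', 'Modelo', 'Tipo de direcao', 'Motor', 'Preco']
--
--
-- def _tokens(s):
--     # comma-split, strip each part, space-split, as a set
--     return {t for part in s.split(",") for t in part.strip().split(" ")}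
--
--
-- def compare_outputs_per_field(car_list_wrapper, car_list_output):
--     pairs = list(zip(car_list_wrapper, car_list_output))
--     expected_fields = {f: sum(1 for cw, co in pairs for comp in co
--                               if comp == f and co[comp] != "N/I")
--                        for f in _FIELDS}
--     filled_fields = {f: sum(1 for cw, co in pairs for comp in co
--                             if comp == f and cw[comp] != "N/I")
--                      for f in _FIELDS}
--     precise_fields = {f: sum(1 for cw, co in pairs for comp in co
--                              if comp == f and co[comp] != "N/I"
--                              and _tokens(cw[comp]) == _tokens(co[comp]))
--                       for f in _FIELDS}
--     cover_fields = {f: sum(1 for cw, co in pairs for comp in co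
--                            if comp == f and co[comp] != "N/I" and cw[comp] != "N/I")
--                     for f in _FIELDS}
--     return expected_fields, filled_fields, precise_fields, cover_fields
-- ===== Notes on version B (the rewrite author's own statement) =====
-- stated objective: alternative
-- what changed: B replaces A's single fused loop that threads four mutable counter dicts through every record with twelve independent per-field counts: each result dict is built by a comprehension over the fixed field list, counting matching (record, key) events over the zipped wrapper/output pairs, and the tokenization builds a set directly instead of chaining maps into a list first.
import Mathlib
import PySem

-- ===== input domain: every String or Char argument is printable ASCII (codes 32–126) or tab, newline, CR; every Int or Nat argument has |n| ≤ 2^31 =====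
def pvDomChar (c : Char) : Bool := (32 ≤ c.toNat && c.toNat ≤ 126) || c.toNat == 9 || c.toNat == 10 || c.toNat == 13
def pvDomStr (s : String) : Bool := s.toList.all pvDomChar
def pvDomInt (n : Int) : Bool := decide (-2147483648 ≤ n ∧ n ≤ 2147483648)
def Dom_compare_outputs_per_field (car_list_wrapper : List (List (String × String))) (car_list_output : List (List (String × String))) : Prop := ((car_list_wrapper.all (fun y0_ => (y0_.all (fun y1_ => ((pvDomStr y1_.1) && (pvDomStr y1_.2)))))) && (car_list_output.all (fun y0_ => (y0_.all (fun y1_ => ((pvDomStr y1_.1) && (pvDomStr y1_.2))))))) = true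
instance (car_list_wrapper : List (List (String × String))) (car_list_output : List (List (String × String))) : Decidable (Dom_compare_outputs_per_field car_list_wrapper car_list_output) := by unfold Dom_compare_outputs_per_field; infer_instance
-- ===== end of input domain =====

-- B tallies each of the four statistics with one count per field over the zipped record pairs
-- (outer loop over the 12 field names) instead of A's single fused loop threading four dicts: objective 'alternative'.

-- ===== PORT A =====
-- the literal 12-key zero dict A writes out (four identical literals in the Python)
def pvInitA : PySem.Dict String Int := PySem.Dict.ofList
  [("Cor", 0), ("Ar condicionado", 0), ("Ano", 0), ("Combustivel", 0), ("Marca", 0), ("Km", 0),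
   ("Opcionais", 0), ("Cambio", 0), ("Modelo", 0), ("Tipo de direcao", 0), ("Motor", 0), ("Preco", 0)]

-- list(chain.from_iterable(map(split(" "), map(strip, s.split(","))))) turned into a set
def pvTokensA (s : String) : PySem.Set String :=
  PySem.Set.ofList (((((PySem.Str.split? s ",").getD []).map (fun a => PySem.Str.strip a)).map
      (fun a => (PySem.Str.split? a " ").getD [])).flatten)

-- the body of A's inner loop (one comp); state = (expected, filled, precise, cover)
def pvBodyA (wd od : PySem.Dict String String)
    (st : PySem.Dict String Int × PySem.Dict String Int × PySem.Dict String Int × PySem.Dict String Int)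
    (comp : String) :
    PySem.Dict String Int × PySem.Dict String Int × PySem.Dict String Int × PySem.Dict String Int :=
  let (expd, fild, pred, covd) := st
  let wv := wd.getD comp ""
  let ov := od.getD comp ""
  let fild := if wv != "N/I" then fild.modify comp 0 (· + 1) else fild
  if ov != "N/I" then
    let expd := expd.modify comp 0 (· + 1)
    let covd := if wv != "N/I" then covd.modify comp 0 (· + 1) else covd
    let pred := if PySem.Set.equal (pvTokensA wv) (pvTokensA ov) then pred.modify comp 0 (· + 1) else pred
    (expd, fild, pred, covd)
  else (expd, fild, pred, covd)

def compare_outputs_per_field (car_list_wrapper : List (List (String × String))) (car_list_output : List (List (String × String))) : (List (String × Int)) × (List (String × Int)) × (List (String × Int)) × (List (String × Int)) :=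
  let res := (PySem.List.pyRange 0 (PySem.List.len car_list_wrapper) 1).foldl
    (fun st i =>
      let wd := PySem.Dict.ofList (PySem.List.pyGetD car_list_wrapper i [])
      let od := PySem.Dict.ofList (PySem.List.pyGetD car_list_output i [])
      (PySem.Dict.keys od).foldl (pvBodyA wd od) st)
    (pvInitA, pvInitA, pvInitA, pvInitA)
  (res.1.items, res.2.1.items, res.2.2.1.items, res.2.2.2.items)

-- ===== PORT B =====
def pvFields : List String :=
  ["Cor", "Ar condicionado", "Ano", "Combustivel", "Marca", "Km",
   "Opcionais", "Cambio", "Modelo", "Tipo de direcao", "Motor", "Preco"]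

-- {t for part in s.split(",") for t in part.strip().split(" ")}
def pvTokensB (s : String) : PySem.Set String :=
  PySem.Set.ofList (((PySem.Str.split? s ",").getD []).flatMap
    (fun part => (PySem.Str.split? (PySem.Str.strip part) " ").getD []))

-- sum(1 for cw, co in pairs for comp in co if cond(cw, co, comp))
def pvCountB (pairs : List (List (String × String) × List (String × String)))
    (cond : PySem.Dict String String → PySem.Dict String String → String → Bool) : Int :=
  pairs.foldl (fun acc p =>
    let cw := PySem.Dict.ofList p.1
    let co := PySem.Dict.ofList p.2
    acc + (((PySem.Dict.keys co).filter (fun comp => cond cw co comp)).length : Int)) 0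

def compare_outputs_per_field_alt (car_list_wrapper : List (List (String × String))) (car_list_output : List (List (String × String))) : (List (String × Int)) × (List (String × Int)) × (List (String × Int)) × (List (String × Int)) :=
  let pairs := car_list_wrapper.zip car_list_output
  let expected := pvFields.map (fun f => (f, pvCountB pairs
    (fun _ co comp => comp == f && co.getD comp "" != "N/I")))
  let filled := pvFields.map (fun f => (f, pvCountB pairs
    (fun cw _ comp => comp == f && cw.getD comp "" != "N/I")))
  let precise := pvFields.map (fun f => (f, pvCountB pairs
    (fun cw co comp => comp == f && co.getD comp "" != "N/I" &&
      PySem.Set.equal (pvTokensB (cw.getD comp "")) (pvTokensB (co.getD comp "")))))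
  let cover := pvFields.map (fun f => (f, pvCountB pairs
    (fun cw co comp => comp == f && co.getD comp "" != "N/I" && cw.getD comp "" != "N/I")))
  (expected, filled, precise, cover)

-- ===== PRECONDITION & SPEC =====
-- Pre_ = exactly the inputs where A returns: enough output records (else IndexError), every key of an
-- output record present in the matching wrapper record (wrapper[i][comp] is read unconditionally, else
-- KeyError), and each such key one of the twelve counter keys unless both values are "N/I" (an increment
-- on an unknown key is a KeyError).
def Pre_compare_outputs_per_field (car_list_wrapper : List (List (String × String))) (car_list_output : List (List (String × String))) : Prop :=
  car_list_wrapper.length ≤ car_list_output.length ∧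
  ∀ i < car_list_wrapper.length,
    ∀ comp ∈ (PySem.Dict.ofList (car_list_output.getD i [])).keys,
      (PySem.Dict.ofList (car_list_wrapper.getD i [])).contains comp = true ∧
      (((PySem.Dict.ofList (car_list_wrapper.getD i [])).getD comp "" = "N/I" ∧
        (PySem.Dict.ofList (car_list_output.getD i [])).getD comp "" = "N/I") ∨ comp ∈ pvFields)
instance (car_list_wrapper : List (List (String × String))) (car_list_output : List (List (String × String))) : Decidable (Pre_compare_outputs_per_field car_list_wrapper car_list_output) := by unfold Pre_compare_outputs_per_field; infer_instance

def pvWitness_compare_outputs_per_field : (List (List (String × String))) × (List (List (String × String))) :=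
  ([[("Cor", "preto"), ("Ano", "N/I")]], [[("Cor", "preto "), ("Ano", "2007")]])

def Spec_compare_outputs_per_field (car_list_wrapper : List (List (String × String))) (car_list_output : List (List (String × String))) (out : (List (String × Int)) × (List (String × Int)) × (List (String × Int)) × (List (String × Int))) : Prop := out = compare_outputs_per_field_alt car_list_wrapper car_list_output
instance (car_list_wrapper : List (List (String × String))) (car_list_output : List (List (String × String))) (out : (List (String × Int)) × (List (String × Int)) × (List (String × Int)) × (List (String × Int))) : Decidable (Spec_compare_outputs_per_field car_list_wrapper car_list_output out) := by unfold Spec_compare_outputs_per_field; infer_instance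

-- ===== CLAIM (what is proved, stated in full; the proofs are below) =====
def Claim_equal_compare_outputs_per_field : Prop := ∀ (car_list_wrapper : List (List (String × String))) (car_list_output : List (List (String × String))), Dom_compare_outputs_per_field car_list_wrapper car_list_output → Pre_compare_outputs_per_field car_list_wrapper car_list_output → Spec_compare_outputs_per_field car_list_wrapper car_list_output (compare_outputs_per_field car_list_wrapper car_list_output)

-- ===== LEMMAS AND PROOFS =====

-- event = (wrapper dict, output dict, field name); the flattened iteration space of both programs
def pvEvents (pairs : List (List (String × String) × List (String × String))) :
    List (PySem.Dict String String × PySem.Dict String String × String) :=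
  pairs.flatMap (fun p => (PySem.Dict.keys (PySem.Dict.ofList p.2)).map
    (fun comp => (PySem.Dict.ofList p.1, PySem.Dict.ofList p.2, comp)))

def pvStepEv (cond : PySem.Dict String String × PySem.Dict String String × String → Bool)
    (d : PySem.Dict String Int) (t : PySem.Dict String String × PySem.Dict String String × String) :
    PySem.Dict String Int :=
  if cond t then d.modify t.2.2 0 (· + 1) else d

def pvCFil (t : PySem.Dict String String × PySem.Dict String String × String) : Bool :=
  t.1.getD t.2.2 "" != "N/I"
def pvCExp (t : PySem.Dict String String × PySem.Dict String String × String) : Bool :=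
  t.2.1.getD t.2.2 "" != "N/I"
def pvCPre (t : PySem.Dict String String × PySem.Dict String String × String) : Bool :=
  pvCExp t && PySem.Set.equal (pvTokensA (t.1.getD t.2.2 "")) (pvTokensA (t.2.1.getD t.2.2 ""))
def pvCCov (t : PySem.Dict String String × PySem.Dict String String × String) : Bool :=
  pvCExp t && pvCFil t

theorem pvTokens_eq (s : String) : pvTokensB s = pvTokensA s := by
  unfold pvTokensA pvTokensB
  simp [List.flatMap, List.map_map]
  rfl

theorem pvBodyA_split (wd od : PySem.Dict String String)
    (a b c d : PySem.Dict String Int) (comp : String) :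
    pvBodyA wd od (a, b, c, d) comp =
      (pvStepEv pvCExp a (wd, od, comp), pvStepEv pvCFil b (wd, od, comp),
       pvStepEv pvCPre c (wd, od, comp), pvStepEv pvCCov d (wd, od, comp)) := by
  unfold pvBodyA pvStepEv pvCExp pvCFil pvCPre pvCCov
  by_cases h1 : (od.getD comp "" != "N/I") = true <;>
    by_cases h2 : (wd.getD comp "" != "N/I") = true <;>
      by_cases h3 : (PySem.Set.equal (pvTokensA (wd.getD comp "")) (pvTokensA (od.getD comp ""))) = true <;>
        simp [h1, h2, h3, pvCExp, pvCFil]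

theorem pvFold4 (E : List (PySem.Dict String String × PySem.Dict String String × String)) :
    ∀ a b c d : PySem.Dict String Int,
    E.foldl (fun st t => pvBodyA t.1 t.2.1 st t.2.2) (a, b, c, d) =
      (E.foldl (pvStepEv pvCExp) a, E.foldl (pvStepEv pvCFil) b,
       E.foldl (pvStepEv pvCPre) c, E.foldl (pvStepEv pvCCov) d) := by
  induction E with
  | nil => intro a b c d; simp
  | cons t ts ih =>
    intro a b c d
    simp only [List.foldl_cons]
    rw [show pvBodyA t.1 t.2.1 (a, b, c, d) t.2.2 =
      (pvStepEv pvCExp a (t.1, t.2.1, t.2.2), pvStepEv pvCFil b (t.1, t.2.1, t.2.2),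
       pvStepEv pvCPre c (t.1, t.2.1, t.2.2), pvStepEv pvCCov d (t.1, t.2.1, t.2.2)) from
      pvBodyA_split t.1 t.2.1 a b c d t.2.2]
    exact ih _ _ _ _

theorem pvFoldRangeNat {γ : Type} (g : γ → List (String × String) → List (String × String) → γ) :
    ∀ (w o : List (List (String × String))), w.length ≤ o.length → ∀ (init : γ),
    (List.range w.length).foldl (fun st k => g st (w.getD k []) (o.getD k [])) init =
      (w.zip o).foldl (fun st p => g st p.1 p.2) init := by
  intro w
  induction w with
  | nil => intro o h init; simp
  | cons a w ih =>
    intro o h init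
    cases o with
    | nil => simp at h
    | cons b o =>
      simp only [List.length_cons, List.range_succ_eq_map, List.foldl_cons, List.foldl_map,
        List.getD_cons_zero, List.getD_cons_succ, List.zip_cons_cons]
      exact ih o (by simpa using h) _

theorem pvFoldRange {γ : Type} (g : γ → List (String × String) → List (String × String) → γ)
    (w o : List (List (String × String))) (h : w.length ≤ o.length) (init : γ) :
    (PySem.List.pyRange 0 (PySem.List.len w) 1).foldl
        (fun st i => g st (PySem.List.pyGetD w i []) (PySem.List.pyGetD o i [])) init =
      (w.zip o).foldl (fun st p => g st p.1 p.2) init := by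
  have hb : (((PySem.List.len w) : Int) - 0).toNat = w.length := by
    simp [PySem.List.len]
  rw [PySem.List.pyRange_one, hb, List.foldl_map]
  simp only [zero_add, PySem.List.pyGetD_natCast]
  exact pvFoldRangeNat g w o h init

theorem pvFoldFlatMap {a b g : Type} (l : List a) (gf : a → List b) (f : g → b → g) :
    ∀ init : g, (l.flatMap gf).foldl f init = l.foldl (fun st x => (gf x).foldl f st) init := by
  induction l with
  | nil => intro init; simp
  | cons x xs ih => intro init; simp [List.flatMap_cons, List.foldl_append, ih]

theorem pvCondFoldFilter (cond : PySem.Dict String String × PySem.Dict String String × String → Bool)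
    (E : List (PySem.Dict String String × PySem.Dict String String × String)) :
    ∀ d : PySem.Dict String Int,
    E.foldl (pvStepEv cond) d =
      ((E.filter cond).map (fun t => t.2.2)).foldl (fun d x => d.modify x 0 (· + 1)) d := by
  induction E with
  | nil => intro d; simp
  | cons t ts ih =>
    intro d
    by_cases h : cond t = true
    · simp [pvStepEv, h, ih]
    · simp [pvStepEv, h, ih]

theorem pvInitA_getD (f : String) : pvInitA.getD f 0 = 0 := by
  cases hg : pvInitA.get? f with
  | none => simp [PySem.Dict.getD_eq_get?_getD, hg]
  | some v =>
    have hv : (f, v) ∈ pvInitA.items := by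
      apply PySem.Dict.mem_items_of_get?_eq_some
      assumption
    have hall : ∀ p ∈ pvInitA.items, p.2 = 0 := by decide
    have hv0 : v = 0 := hall _ hv
    simp [PySem.Dict.getD_eq_get?_getD, hg, hv0]

theorem pvItemsCount (l : List String) (hl : ∀ x ∈ l, x ∈ pvFields) :
    (l.foldl (fun d x => d.modify x 0 (· + 1)) pvInitA).items =
      pvFields.map (fun f => (f, (l.count f : Int))) := by
  have hkeys : (l.foldl (fun d x => d.modify x 0 (· + 1)) pvInitA).keys = pvFields := by
    rw [PySem.Dict.keys_foldl_modify]
    have h0 : pvInitA.keys = pvFields := by decide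
    rw [h0, PySem.Set.update_eq_append_filter]
    have hnil : (PySem.Set.ofList l).filter (fun y => !(PySem.Set.contains pvFields y)) = [] := by
      apply List.filter_eq_nil_iff.mpr
      intro y hy
      have hy' : y ∈ l := by
        rw [PySem.Set.mem_ofList] at hy
        exact hy
      have hmem : y ∈ pvFields := hl y hy'
      have hcon : PySem.Set.contains pvFields y = true := by
        rw [PySem.Set.contains_iff]
        exact hmem
      simpa using hmem
    rw [hnil, List.append_nil]
  have hnd : (l.foldl (fun d x => d.modify x 0 (· + 1)) pvInitA).keys.Nodup := by
    rw [hkeys]; decide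
  rw [PySem.Dict.items_eq_map_keys _ hnd 0, hkeys]
  apply List.map_congr_left
  intro f hf
  rw [PySem.Dict.getD_foldl_modify_add_one, pvInitA_getD]
  simp

theorem pvCountB_aux (c : PySem.Dict String String × PySem.Dict String String × String → Bool)
    (f : String)
    (cond : PySem.Dict String String → PySem.Dict String String → String → Bool)
    (hc : ∀ cw co comp, cond cw co comp = (comp == f && c (cw, co, comp))) :
    ∀ (pairs : List (List (String × String) × List (String × String))) (acc : Int),
    pairs.foldl (fun acc p =>
        let cw := PySem.Dict.ofList p.1
        let co := PySem.Dict.ofList p.2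
        acc + (((PySem.Dict.keys co).filter (fun comp => cond cw co comp)).length : Int)) acc =
      acc + (((((pvEvents pairs).filter c).map (fun t => t.2.2)).count f : Nat) : Int) := by
  intro pairs
  induction pairs with
  | nil => intro acc; simp [pvEvents]
  | cons p ps ih =>
    intro acc
    have hhead : (((PySem.Dict.keys (PySem.Dict.ofList p.2)).filter
        (fun comp => cond (PySem.Dict.ofList p.1) (PySem.Dict.ofList p.2) comp)).length : Nat)
        = ((((PySem.Dict.keys (PySem.Dict.ofList p.2)).map
            (fun comp => (PySem.Dict.ofList p.1, PySem.Dict.ofList p.2, comp))).filter c).map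
              (fun t => t.2.2)).count f := by
      simp only [List.filter_map, List.map_map, Function.comp_def, List.count,
        List.countP_eq_length_filter, List.map_id', List.filter_filter]
      congr 1
      apply List.filter_congr
      intro comp _
      rw [hc]
    simp only [List.foldl_cons]
    rw [ih]
    simp only [pvEvents, List.flatMap_cons, List.filter_append, List.map_append,
      List.count_append]
    rw [← pvEvents]
    push_cast
    rw [hhead]
    ring

theorem pvCountB_eq (c : PySem.Dict String String × PySem.Dict String String × String → Bool)
    (f : String)
    (cond : PySem.Dict String String → PySem.Dict String String → String → Bool)
    (hc : ∀ cw co comp, cond cw co comp = (comp == f && c (cw, co, comp)))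
    (pairs : List (List (String × String) × List (String × String))) :
    pvCountB pairs cond = (((((pvEvents pairs).filter c).map (fun t => t.2.2)).count f : Nat) : Int) := by
  unfold pvCountB
  rw [pvCountB_aux c f cond hc pairs 0]
  simp



-- canonical form both programs reduce to
def pvCanon (w o : List (List (String × String))) :
    (List (String × Int)) × (List (String × Int)) × (List (String × Int)) × (List (String × Int)) :=
  (pvFields.map (fun f => (f, ((((pvEvents (w.zip o)).filter pvCExp).map (fun t => t.2.2)).count f : Int))),
   pvFields.map (fun f => (f, ((((pvEvents (w.zip o)).filter pvCFil).map (fun t => t.2.2)).count f : Int))),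
   pvFields.map (fun f => (f, ((((pvEvents (w.zip o)).filter pvCPre).map (fun t => t.2.2)).count f : Int))),
   pvFields.map (fun f => (f, ((((pvEvents (w.zip o)).filter pvCCov).map (fun t => t.2.2)).count f : Int))))

theorem pvA_eq (w o : List (List (String × String))) (hlen : w.length ≤ o.length) :
    compare_outputs_per_field w o =
      (let res := (pvEvents (w.zip o)).foldl (fun st t => pvBodyA t.1 t.2.1 st t.2.2)
        (pvInitA, pvInitA, pvInitA, pvInitA)
       (res.1.items, res.2.1.items, res.2.2.1.items, res.2.2.2.items)) := by
  unfold compare_outputs_per_field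
  rw [pvFoldRange (fun st wl ol =>
    (PySem.Dict.keys (PySem.Dict.ofList ol)).foldl (pvBodyA (PySem.Dict.ofList wl) (PySem.Dict.ofList ol)) st)
    w o hlen]
  unfold pvEvents
  rw [pvFoldFlatMap]
  simp only [List.foldl_map]

theorem pvE_mem (w o : List (List (String × String)))
    (t : PySem.Dict String String × PySem.Dict String String × String)
    (ht : t ∈ pvEvents (w.zip o)) :
    ∃ i, i < w.length ∧ t.1 = PySem.Dict.ofList (w.getD i []) ∧
      t.2.1 = PySem.Dict.ofList (o.getD i []) ∧
      t.2.2 ∈ (PySem.Dict.ofList (o.getD i [])).keys := by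
  unfold pvEvents at ht
  rw [List.mem_flatMap] at ht
  obtain ⟨p, hp, htm⟩ := ht
  rw [List.mem_iff_getElem] at hp
  obtain ⟨i, hi, hpi⟩ := hp
  rw [List.length_zip] at hi
  have hiw : i < w.length := lt_of_lt_of_le hi (min_le_left _ _)
  have hio : i < o.length := lt_of_lt_of_le hi (min_le_right _ _)
  rw [List.mem_map] at htm
  obtain ⟨comp, hcomp, hteq⟩ := htm
  have hp1 : p.1 = w[i] := by rw [← hpi, List.getElem_zip]
  have hp2 : p.2 = o[i] := by rw [← hpi, List.getElem_zip]
  refine ⟨i, hiw, ?_, ?_, ?_⟩ <;>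
    simp only [← hteq, hp1, hp2, List.getD_eq_getElem _ _ hiw, List.getD_eq_getElem _ _ hio]
  rw [hp2] at hcomp
  exact hcomp

theorem pvB_canon (w o : List (List (String × String))) :
    compare_outputs_per_field_alt w o = pvCanon w o := by
  unfold compare_outputs_per_field_alt pvCanon
  refine congrArg₂ Prod.mk ?_ (congrArg₂ Prod.mk ?_ (congrArg₂ Prod.mk ?_ ?_))
  · apply List.map_congr_left
    intro f _
    exact congrArg (Prod.mk f) (pvCountB_eq pvCExp f _ (fun cw co comp => rfl) _)
  · apply List.map_congr_left
    intro f _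
    exact congrArg (Prod.mk f) (pvCountB_eq pvCFil f _ (fun cw co comp => rfl) _)
  · apply List.map_congr_left
    intro f _
    refine congrArg (Prod.mk f) (pvCountB_eq pvCPre f _ (fun cw co comp => ?_) _)
    simp [pvCPre, pvCExp, Bool.and_assoc, pvTokens_eq]
  · apply List.map_congr_left
    intro f _
    refine congrArg (Prod.mk f) (pvCountB_eq pvCCov f _ (fun cw co comp => ?_) _)
    simp [pvCCov, pvCExp, pvCFil, Bool.and_assoc]

theorem pvA_canon (w o : List (List (String × String))) (hlen : w.length ≤ o.length)
    (hkey : ∀ i < w.length,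
      ∀ comp ∈ (PySem.Dict.ofList (o.getD i [])).keys,
        (PySem.Dict.ofList (w.getD i [])).contains comp = true ∧
        (((PySem.Dict.ofList (w.getD i [])).getD comp "" = "N/I" ∧
          (PySem.Dict.ofList (o.getD i [])).getD comp "" = "N/I") ∨ comp ∈ pvFields)) :
    compare_outputs_per_field w o = pvCanon w o := by
  have hfield : ∀ t ∈ pvEvents (w.zip o),
      (pvCExp t = true ∨ pvCFil t = true) → t.2.2 ∈ pvFields := by
    intro t ht hc
    obtain ⟨i, hi, h1, h21, h22⟩ := pvE_mem w o t ht
    rcases (hkey i hi t.2.2 h22).2 with hboth | hmem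
    · exfalso
      rcases hc with hx | hx
      · rw [pvCExp, h21, hboth.2] at hx
        simp at hx
      · rw [pvCFil, h1, hboth.1] at hx
        simp at hx
    · exact hmem
  have hmemOf : ∀ (c : PySem.Dict String String × PySem.Dict String String × String → Bool),
      (∀ t, c t = true → pvCExp t = true ∨ pvCFil t = true) →
      ∀ x ∈ ((pvEvents (w.zip o)).filter c).map (fun t => t.2.2), x ∈ pvFields := by
    intro c hci x hx
    rw [List.mem_map] at hx
    obtain ⟨t, ht, rfl⟩ := hx
    rw [List.mem_filter] at ht
    exact hfield t ht.1 (hci t ht.2)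
  rw [pvA_eq w o hlen]
  simp only [pvFold4]
  rw [pvCondFoldFilter, pvCondFoldFilter, pvCondFoldFilter, pvCondFoldFilter]
  unfold pvCanon
  refine congrArg₂ Prod.mk ?_ (congrArg₂ Prod.mk ?_ (congrArg₂ Prod.mk ?_ ?_))
  · exact pvItemsCount _ (hmemOf pvCExp (fun t h => Or.inl h))
  · exact pvItemsCount _ (hmemOf pvCFil (fun t h => Or.inr h))
  · exact pvItemsCount _ (hmemOf pvCPre (fun t h => Or.inl (by
      rw [pvCPre, Bool.and_eq_true] at h
      exact h.1)))
  · exact pvItemsCount _ (hmemOf pvCCov (fun t h => Or.inl (by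
      rw [pvCCov, Bool.and_eq_true] at h
      exact h.1)))

-- ===== VERDICT (by name: the statement is the Claim_ definition above) =====
theorem compare_outputs_per_field_spec : Claim_equal_compare_outputs_per_field := by
  intro w o _ hpre
  unfold Spec_compare_outputs_per_field
  exact (pvA_canon w o hpre.1 hpre.2).trans (pvB_canon w o).symm
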